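-- pv_equiv track=rewrite | github.com/naolca/A2SV | DominoPilling.py | dominoPilling
-- ===== SOURCE A (Python) =====
-- def dominoPilling(m,n):
--     max_Area=m*n
--     dominoes=0
--     area=1
--     while area<max_Area:
--         dominoes+=1
--         area+=2
--     return dominoes
-- ===== SOURCE B (Python) =====
-- def dominoPilling(m, n):
--     return max(m * n, 0) // 2
-- ===== Notes on version B (the rewrite author's own statement) =====
-- stated objective: faster
-- what changed: replaced the counting loop (area += 2 until it reaches m*n) by the closed form max(m*n,0)//2
import Mathlib
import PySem

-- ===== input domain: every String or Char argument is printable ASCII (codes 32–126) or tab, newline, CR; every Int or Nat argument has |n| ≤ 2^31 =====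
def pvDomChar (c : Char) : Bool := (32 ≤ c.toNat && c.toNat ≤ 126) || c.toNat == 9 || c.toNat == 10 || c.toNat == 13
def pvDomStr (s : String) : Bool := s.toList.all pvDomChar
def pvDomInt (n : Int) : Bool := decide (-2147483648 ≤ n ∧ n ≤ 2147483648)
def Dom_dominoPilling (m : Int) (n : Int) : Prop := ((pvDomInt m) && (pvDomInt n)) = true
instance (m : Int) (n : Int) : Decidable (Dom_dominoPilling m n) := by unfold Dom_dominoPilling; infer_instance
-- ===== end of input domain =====

-- B replaces A's unit-step counting loop by the closed form max(m*n,0)//2 (O(1) instead of O(m*n)).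

-- ===== PORT A =====
-- the while loop of A: state (dominoes, area), loop while area < max_Area
def dominoPillingLoop (maxArea : Int) (dominoes : Int) (area : Int) : Int :=
  if area < maxArea then dominoPillingLoop maxArea (dominoes + 1) (area + 2)
  else dominoes
termination_by (maxArea - area).toNat
decreasing_by omega

def dominoPilling (m : Int) (n : Int) : Int :=
  dominoPillingLoop (m * n) 0 1

-- ===== PORT B =====
def dominoPilling_alt (m : Int) (n : Int) : Int :=
  PySem.Int.floordiv (max (m * n) 0) 2

-- ===== PRECONDITION & SPEC =====
def Spec_dominoPilling (m : Int) (n : Int) (out : Int) : Prop := out = dominoPilling_alt m n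
instance (m : Int) (n : Int) (out : Int) : Decidable (Spec_dominoPilling m n out) := by unfold Spec_dominoPilling; infer_instance

-- ===== CLAIM (what is proved, stated in full; the proofs are below) =====
def Claim_equal_dominoPilling : Prop := ∀ (m : Int) (n : Int), Dom_dominoPilling m n → Spec_dominoPilling m n (dominoPilling m n)

-- ===== LEMMAS AND PROOFS =====
-- closed form of A's loop: it adds max 0 ⌈(maxArea - area)/2⌉ to the accumulator
theorem dominoPillingLoop_eq (maxArea area dominoes : Int) :
    dominoPillingLoop maxArea dominoes area = dominoes + max 0 ((maxArea - area + 1) / 2) := by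
  unfold dominoPillingLoop
  split
  · rw [dominoPillingLoop_eq maxArea (area + 2) (dominoes + 1)]
    omega
  · omega
termination_by (maxArea - area).toNat
decreasing_by omega

-- ===== VERDICT (by name: the statement is the Claim_ definition above) =====
theorem dominoPilling_spec : Claim_equal_dominoPilling := by
  intro m n _
  unfold Spec_dominoPilling dominoPilling dominoPilling_alt
  rw [dominoPillingLoop_eq, PySem.Int.floordiv_eq_ediv_of_pos (by omega)]
  omega
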